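-- pv_equiv track=rewrite | github.com/GabyLE/FundamentosProgramacion-Python-MisionTIC-2022- | Semana-3/T5-Cartas/Funciones.py | cartaMayorRepartida
-- ===== SOURCE A (Python) =====
-- def mayor(lista):
--     mayor = 0
--     for i in lista:
--         if i > mayor:
--             mayor = i
--     return mayor
--
-- def cartaMayorRepartida(cartas):
--     aces = [1, 14, 27, 40]
--     ace = []
--     no_ace = []
--     for carta in cartas:
--         if carta in aces:
--             ace.append(carta)
--         else:
--             no_ace.append(carta)
--
--     if len(ace) != 0:
--         cartaMayor = mayor(ace)
--     else:
--         cartaMayor = mayor(no_ace)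
--
--     return cartaMayor
-- ===== SOURCE B (Python) =====
-- def cartaMayorRepartida(cartas):
--     aces = {1, 14, 27, 40}
--     saw_ace = False
--     best_ace = 0
--     best_other = 0
--     for carta in cartas:
--         if carta in aces:
--             saw_ace = True
--             best_ace = max(best_ace, carta)
--         else:
--             best_other = max(best_other, carta)
--     return best_ace if saw_ace else best_other
-- ===== Notes on version B (the rewrite author's own statement) =====
-- stated objective: simpler
-- what changed: Replaces the two-list partition plus a separate max-scan helper with a single pass maintaining a saw-ace flag and two running maxima, building no intermediate lists.
import Mathlib
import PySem

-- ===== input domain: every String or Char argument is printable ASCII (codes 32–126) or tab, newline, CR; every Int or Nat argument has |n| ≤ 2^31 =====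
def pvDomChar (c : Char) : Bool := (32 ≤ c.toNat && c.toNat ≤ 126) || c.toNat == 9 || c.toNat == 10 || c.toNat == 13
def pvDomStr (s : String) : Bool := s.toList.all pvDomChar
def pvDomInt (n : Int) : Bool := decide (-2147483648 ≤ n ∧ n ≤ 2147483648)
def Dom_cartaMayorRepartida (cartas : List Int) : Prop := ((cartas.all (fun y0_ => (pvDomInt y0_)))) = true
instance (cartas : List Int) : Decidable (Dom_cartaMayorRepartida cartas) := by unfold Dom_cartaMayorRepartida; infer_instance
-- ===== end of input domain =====

-- B replaces A's two-list partition + separate max helper with a single pass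
-- keeping a saw-ace flag and two running maxima (objective: simpler).


-- ===== PORT A =====
-- helper 'mayor': max-scan starting at 0, literal port of the Python helper
def mayorA (lista : List Int) : Int :=
  lista.foldl (fun m i => if i > m then i else m) 0

-- the partition loop body of A
def stepA (st : List Int × List Int) (carta : Int) : List Int × List Int :=
  if carta ∈ ([1, 14, 27, 40] : List Int) then (st.1 ++ [carta], st.2)
  else (st.1, st.2 ++ [carta])

def cartaMayorRepartida (cartas : List Int) : Int :=
  let p := cartas.foldl stepA ([], [])
  if p.1.length ≠ 0 then mayorA p.1 else mayorA p.2

-- ===== PORT B =====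
-- B's loop body: (sawAce, bestAce, bestOther)
def stepB (st : Bool × Int × Int) (carta : Int) : Bool × Int × Int :=
  if carta = 1 ∨ carta = 14 ∨ carta = 27 ∨ carta = 40 then
    (true, max st.2.1 carta, st.2.2)
  else
    (st.1, st.2.1, max st.2.2 carta)

def cartaMayorRepartida_alt (cartas : List Int) : Int :=
  let st := cartas.foldl stepB (false, 0, 0)
  if st.1 then st.2.1 else st.2.2

-- ===== PRECONDITION & SPEC =====
def Spec_cartaMayorRepartida (cartas : List Int) (out : Int) : Prop := out = cartaMayorRepartida_alt cartas
instance (cartas : List Int) (out : Int) : Decidable (Spec_cartaMayorRepartida cartas out) := by unfold Spec_cartaMayorRepartida; infer_instance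

-- ===== CLAIM (what is proved, stated in full; the proofs are below) =====
def Claim_equal_cartaMayorRepartida : Prop := ∀ (cartas : List Int), Dom_cartaMayorRepartida cartas → Spec_cartaMayorRepartida cartas (cartaMayorRepartida cartas)

-- ===== LEMMAS AND PROOFS =====

-- mayorA over an appended element is a running max
lemma mayorA_append_singleton (l : List Int) (c : Int) :
    mayorA (l ++ [c]) = max (mayorA l) c := by
  simp only [mayorA, List.foldl_append, List.foldl_cons, List.foldl_nil]
  rcases le_or_gt c (List.foldl (fun m i => if i > m then i else m) 0 l) with h | h
  · simp [not_lt.mpr h, max_eq_left h]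
  · simp [h, max_eq_right (le_of_lt h)]

-- invariant tying B's single-pass state to A's partition state
lemma loop_inv (cartas : List Int) : ∀ (a n : List Int),
    cartas.foldl stepB (decide (a ≠ []), mayorA a, mayorA n)
      = (decide ((cartas.foldl stepA (a, n)).1 ≠ []),
         mayorA (cartas.foldl stepA (a, n)).1,
         mayorA (cartas.foldl stepA (a, n)).2) := by
  induction cartas with
  | nil => intro a n; simp
  | cons c cs ih =>
    intro a n
    simp only [List.foldl_cons, stepA, stepB]
    by_cases hc : c ∈ ([1, 14, 27, 40] : List Int)
    · have hc' : c = 1 ∨ c = 14 ∨ c = 27 ∨ c = 40 := by simpa using hc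
      simp only [if_pos hc, if_pos hc']
      have : (true : Bool) = decide (a ++ [c] ≠ []) := by simp
      rw [this, ← mayorA_append_singleton]
      exact ih (a ++ [c]) n
    · have hc' : ¬ (c = 1 ∨ c = 14 ∨ c = 27 ∨ c = 40) := by simpa using hc
      simp only [if_neg hc, if_neg hc']
      rw [← mayorA_append_singleton]
      exact ih a (n ++ [c])

-- ===== VERDICT (by name: the statement is the Claim_ definition above) =====
theorem cartaMayorRepartida_spec : Claim_equal_cartaMayorRepartida := by
  intro cartas _
  unfold Spec_cartaMayorRepartida cartaMayorRepartida cartaMayorRepartida_alt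
  have h := loop_inv cartas [] []
  simp only [mayorA, List.foldl_nil, ne_eq, not_true_eq_false, decide_false] at h
  rw [show (false, (0:Int), (0:Int)) = (decide (([]:List Int) ≠ []), mayorA [], mayorA []) by simp [mayorA]]
  rw [loop_inv cartas [] []]
  rcases hp : cartas.foldl stepA ([], []) with ⟨pa, pn⟩
  by_cases hpa : pa = [] <;> simp [hpa]
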